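-- pv_equiv track=rewrite | github.com/Trottero/aoc-2023 | 14/part2.py | shift_west
-- ===== SOURCE A (Python) =====
-- def shift_west(platform: list[list[str]]) -> list[list[str]]:
--     shifted = True
--     while shifted:
--         shifted = False
--         for row in range(len(platform)):
--             if shifted:
--                 break
--             for col in range(len(platform[row]) - 1):
--                 if platform[row][col] == "." and platform[row][col + 1] == "O":
--                     platform[row][col] = "O"
--                     platform[row][col + 1] = "."
--                     shifted = True
--
--     return platform
-- ===== SOURCE B (Python) =====
-- # Single pass per row: compact "O"s to the left within each segment bounded by
-- # blocker cells (anything other than "." or "O"); rows with no "O" or no "." are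
-- # already settled and skipped. Like A, mutates the argument's rows in place;
-- # equivalence is about the return value.
-- def shift_west(platform: list[list[str]]) -> list[list[str]]:
--     for i, row in enumerate(platform):
--         if "O" not in row or "." not in row:
--             continue  # nothing can move in this row
--         out = []
--         o = d = 0
--         for cell in row:
--             if cell == "O":
--                 o += 1
--             elif cell == ".":
--                 d += 1
--             else:
--                 out.extend(["O"] * o + ["."] * d)
--                 out.append(cell)
--                 o = d = 0
--         out.extend(["O"] * o + ["."] * d)
--         platform[i][:] = out
--     return platform
-- ===== Notes on version B (the rewrite author's own statement) =====
-- stated objective: alternative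
-- what changed: A repeatedly re-scans the whole platform, bubbling each 'O' one cell left per pass until a fixed point; B makes a single left-to-right pass per row with two counters, emitting the O's-then-dots compaction of each blocker-bounded segment (rows lacking 'O' or '.' are left untouched).
import Mathlib
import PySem

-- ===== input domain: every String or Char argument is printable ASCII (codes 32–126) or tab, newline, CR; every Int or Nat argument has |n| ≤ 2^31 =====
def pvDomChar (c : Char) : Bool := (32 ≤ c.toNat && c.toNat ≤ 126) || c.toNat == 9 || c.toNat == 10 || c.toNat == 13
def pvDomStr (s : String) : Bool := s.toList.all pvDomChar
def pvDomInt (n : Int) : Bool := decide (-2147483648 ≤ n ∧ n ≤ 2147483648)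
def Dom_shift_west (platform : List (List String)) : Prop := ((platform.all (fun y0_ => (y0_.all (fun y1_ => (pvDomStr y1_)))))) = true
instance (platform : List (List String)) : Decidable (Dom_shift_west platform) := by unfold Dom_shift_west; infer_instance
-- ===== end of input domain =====

-- B replaces A's repeated bubble passes by one left-to-right compaction pass per row; A mutates
-- its argument in place (B mutates the rows too), the equivalence proved is about the return value.

-- ===== PORT A =====
-- one inner-loop scan of a single row: swaps (".","O") pairs as it goes, returns (row, shifted)
def pvRowScan : List String → List String × Bool
  | [] => ([], false)
  | [a] => ([a], false)
  | a :: b :: rest =>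
    if a = "." ∧ b = "O" then
      -- after the swap the cell at col+1 is "."; the scan continues from there
      let r := pvRowScan ("." :: rest)
      ("O" :: r.1, true)
    else
      let r := pvRowScan (b :: rest)
      (a :: r.1, r.2)
termination_by l => l.length
decreasing_by all_goals (simp; try omega)

-- the `for row` loop of one `while` iteration: stops after the first row that shifted
def pvRowsScan : List (List String) → List (List String) × Bool
  | [] => ([], false)
  | r :: rs =>
    let s := pvRowScan r
    if s.2 then (s.1 :: rs, true)
    else
      let t := pvRowsScan rs
      (s.1 :: t.1, t.2)

-- termination measure: number of (".", later "O") inversions in a row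
def pvRowMu : List String → Nat
  | [] => 0
  | a :: t => (if a = "." then t.count "O" else 0) + pvRowMu t

def pvPlatMu (p : List (List String)) : Nat := (p.map pvRowMu).sum

theorem pvRowScan_count (r : List String) : ((pvRowScan r).1).count "O" = r.count "O" := by
  fun_induction pvRowScan r with
  | case1 => rfl
  | case2 a => rfl
  | case3 a b rest h r' ih =>
    obtain ⟨ha, hb⟩ := h
    subst ha hb
    simp_all [pvRowScan, List.count_cons, r']
  | case4 a b rest h r' ih =>
    simp_all [pvRowScan, List.count_cons, r']

theorem pvRowMu_cons (x : String) (t : List String) :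
    pvRowMu (x :: t) = (if x = "." then t.count "O" else 0) + pvRowMu t := rfl

theorem pvRowScan_mu (r : List String) :
    pvRowMu (pvRowScan r).1 ≤ pvRowMu r ∧
      ((pvRowScan r).2 = true → pvRowMu (pvRowScan r).1 < pvRowMu r) := by
  fun_induction pvRowScan r with
  | case1 => simp
  | case2 a => simp
  | case3 a b rest h r' ih =>
    obtain ⟨ha, hb⟩ := h
    subst ha hb
    have hc := pvRowScan_count ("." :: rest)
    have h1 := ih.1
    have key : pvRowMu ("O" :: (pvRowScan ("." :: rest)).1) < pvRowMu ("." :: "O" :: rest) := by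
      rw [pvRowMu_cons, pvRowMu_cons, pvRowMu_cons] at *
      simp_all
      omega
    exact ⟨key.le, fun _ => key⟩
  | case4 a b rest h r' ih =>
    have hc := pvRowScan_count (b :: rest)
    have h1 := ih.1
    have key : ∀ s : List String, s.count "O" = (b :: rest).count "O" →
        pvRowMu s ≤ pvRowMu (b :: rest) →
        pvRowMu (a :: s) ≤ pvRowMu (a :: b :: rest) := by
      intro s hcs hms
      rw [pvRowMu_cons a s, pvRowMu_cons a (b :: rest)]
      rw [hcs]
      split <;> omega
    constructor
    · exact key _ hc h1
    · intro hs
      have hs' : (pvRowScan (b :: rest)).2 = true := hs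
      have h2 := ih.2 hs'
      show pvRowMu (a :: (pvRowScan (b :: rest)).1) < pvRowMu (a :: b :: rest)
      rw [pvRowMu_cons a _, pvRowMu_cons a (b :: rest), hc]
      split <;> omega

theorem pvRowScan_false : ∀ (r : List String), (pvRowScan r).2 = false → (pvRowScan r).1 = r := by
  intro r
  fun_induction pvRowScan r with
  | case1 => intro _; rfl
  | case2 a => intro _; rfl
  | case3 a b rest hh r' ih => intro h; exact absurd h (by simp)
  | case4 a b rest hh r' ih =>
    intro h
    show a :: (pvRowScan (b :: rest)).1 = a :: b :: rest
    rw [ih h]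

theorem pvRowsScan_mu (p : List (List String)) (h : (pvRowsScan p).2 = true) :
    pvPlatMu (pvRowsScan p).1 < pvPlatMu p := by
  induction p with
  | nil => simp [pvRowsScan] at h
  | cons r rs ih =>
    by_cases hs : (pvRowScan r).2 = true
    · have h1 : pvRowsScan (r :: rs) = ((pvRowScan r).1 :: rs, true) := by
        simp [pvRowsScan, hs]
      rw [h1]
      have := (pvRowScan_mu r).2 hs
      simp only [pvPlatMu, List.map_cons, List.sum_cons]
      omega
    · have hs' : (pvRowScan r).2 = false := by simpa using hs
      have h1 : pvRowsScan (r :: rs) = ((pvRowScan r).1 :: (pvRowsScan rs).1, (pvRowsScan rs).2) := by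
        simp [pvRowsScan, hs']
      rw [h1] at h ⊢
      simp only at h
      have h2 := ih h
      rw [pvRowScan_false r hs']
      simp only [pvPlatMu, List.map_cons, List.sum_cons] at h2 ⊢
      omega

-- the `while shifted` loop
def pvLoop (p : List (List String)) : List (List String) :=
  let s := pvRowsScan p
  if h : s.2 = true then pvLoop s.1 else s.1
termination_by pvPlatMu p
decreasing_by exact pvRowsScan_mu p h

def shift_west (platform : List (List String)) : List (List String) := pvLoop platform

-- ===== PORT B =====
-- single pass with counters o (pending "O"s) and d (pending "."s), flushed at each blocker;
-- a row without an "O" or without a "." is returned unchanged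
def pvCompact : List String → Nat → Nat → List String
  | [], o, d => List.replicate o "O" ++ List.replicate d "."
  | c :: t, o, d =>
    if c = "O" then pvCompact t (o + 1) d
    else if c = "." then pvCompact t o (d + 1)
    else List.replicate o "O" ++ List.replicate d "." ++ c :: pvCompact t 0 0

def shift_west_alt (platform : List (List String)) : List (List String) :=
  platform.map (fun r => if ¬ ("O" ∈ r) ∨ ¬ ("." ∈ r) then r else pvCompact r 0 0)

-- ===== PRECONDITION & SPEC =====
def Spec_shift_west (platform : List (List String)) (out : List (List String)) : Prop := out = shift_west_alt platform
instance (platform : List (List String)) (out : List (List String)) : Decidable (Spec_shift_west platform out) := by unfold Spec_shift_west; infer_instance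

-- ===== CLAIM (what is proved, stated in full; the proofs are below) =====
def Claim_equal_shift_west : Prop := ∀ (platform : List (List String)), Dom_shift_west platform → Spec_shift_west platform (shift_west platform)

-- ===== LEMMAS AND PROOFS =====

-- "no (\".\",\"O\") adjacency" — the fixed-point condition of A's bubble pass
def pvNoRoll : List String → Prop
  | [] => True
  | [_] => True
  | a :: b :: t => ¬(a = "." ∧ b = "O") ∧ pvNoRoll (b :: t)

theorem pvNoRoll_tail (c : String) (t : List String) (h : pvNoRoll (c :: t)) : pvNoRoll t := by
  cases t with
  | nil => trivial
  | cons b t' => exact h.2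

-- a stable row is its own compaction
theorem pvCompact_stable (r : List String) (o d : Nat)
    (hch : pvNoRoll r)
    (hd : d = 0 ∨ r.head? ≠ some "O") :
    pvCompact r o d = List.replicate o "O" ++ List.replicate d "." ++ r := by
  induction r generalizing o d with
  | nil => simp [pvCompact]
  | cons c t ih =>
    have hch' : pvNoRoll t := pvNoRoll_tail c t hch
    by_cases hO : c = "O"
    · subst hO
      have hd0 : d = 0 := by
        rcases hd with h | h
        · exact h
        · simp at h
      subst hd0
      have hstep : pvCompact ("O" :: t) o 0 = pvCompact t (o + 1) 0 := by simp [pvCompact]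
      rw [hstep, ih _ _ hch' (Or.inl rfl)]
      simp [List.replicate_succ']
    · by_cases hdot : c = "."
      · subst hdot
        have hstep : pvCompact ("." :: t) o d = pvCompact t o (d + 1) := by
          simp [pvCompact]
        have hhead : t.head? ≠ some "O" := by
          cases t with
          | nil => simp
          | cons b t' =>
            simp only [List.head?, ne_eq, Option.some.injEq]
            intro hb
            exact hch.1 ⟨rfl, hb⟩
        rw [hstep, ih _ _ hch' (Or.inr hhead)]
        simp [List.replicate_succ']
      · have hstep : pvCompact (c :: t) o d
            = List.replicate o "O" ++ List.replicate d "." ++ c :: pvCompact t 0 0 := by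
          simp [pvCompact, hO, hdot]
        rw [hstep, ih _ _ hch' (Or.inl rfl)]
        simp

-- if a full scan produced no swap, the row has no (".","O") adjacency
theorem pvRowScan_noRoll : ∀ (r : List String), (pvRowScan r).2 = false → pvNoRoll r := by
  intro r
  fun_induction pvRowScan r with
  | case1 => intro _; trivial
  | case2 a => intro _; trivial
  | case3 a b rest hh r' ih => intro h; exact absurd h (by simp)
  | case4 a b rest hh r' ih =>
    intro h
    exact ⟨hh, ih h⟩

-- one scan does not change the compacted form
theorem pvRowScan_compact (r : List String) : ∀ (o d : Nat),
    pvCompact (pvRowScan r).1 o d = pvCompact r o d := by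
  fun_induction pvRowScan r with
  | case1 => intro o d; rfl
  | case2 a => intro o d; rfl
  | case3 a b rest hh r' ih =>
    intro o d
    obtain ⟨ha, hb⟩ := hh; subst ha hb
    show pvCompact ("O" :: (pvRowScan ("." :: rest)).1) o d = pvCompact ("." :: "O" :: rest) o d
    have h1 : pvCompact ("O" :: (pvRowScan ("." :: rest)).1) o d
        = pvCompact (pvRowScan ("." :: rest)).1 (o + 1) d := by simp [pvCompact]
    rw [h1, ih (o + 1) d]
    simp [pvCompact]
  | case4 a b rest hh r' ih =>
    intro o d
    show pvCompact (a :: (pvRowScan (b :: rest)).1) o d = pvCompact (a :: b :: rest) o d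
    by_cases hO : a = "O"
    · subst hO
      simp only [pvCompact, if_pos rfl]
      exact ih (o + 1) d
    · by_cases hdot : a = "."
      · subst hdot
        simp only [pvCompact, if_neg (by decide : ¬("." : String) = "O"), if_pos rfl]
        exact ih o (d + 1)
      · simp only [pvCompact, if_neg hO, if_neg hdot, ih 0 0]

theorem pvRowsScan_false (p : List (List String)) (h : (pvRowsScan p).2 = false) :
    (pvRowsScan p).1 = p ∧ p.map (fun r => pvCompact r 0 0) = p := by
  induction p with
  | nil => simp [pvRowsScan]
  | cons r rs ih =>
    by_cases hs : (pvRowScan r).2 = true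
    · simp [pvRowsScan, hs] at h
    · have hs' : (pvRowScan r).2 = false := by simpa using hs
      have h1 : pvRowsScan (r :: rs) = ((pvRowScan r).1 :: (pvRowsScan rs).1, (pvRowsScan rs).2) := by
        simp [pvRowsScan, hs']
      rw [h1] at h ⊢
      simp only at h
      obtain ⟨h2, h3⟩ := ih h
      have h4 := pvRowScan_false r hs'
      have h5 : pvCompact r 0 0 = r := by
        have := pvCompact_stable r 0 0 (pvRowScan_noRoll r hs') (Or.inl rfl)
        simpa using this
      simp [h2, h3, h4, h5]

theorem pvRowsScan_compact (p : List (List String)) :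
    (pvRowsScan p).1.map (fun r => pvCompact r 0 0) = p.map (fun r => pvCompact r 0 0) := by
  induction p with
  | nil => simp [pvRowsScan]
  | cons r rs ih =>
    by_cases hs : (pvRowScan r).2 = true
    · have h1 : pvRowsScan (r :: rs) = ((pvRowScan r).1 :: rs, true) := by simp [pvRowsScan, hs]
      rw [h1]
      simp [pvRowScan_compact r 0 0]
    · have hs' : (pvRowScan r).2 = false := by simpa using hs
      have h1 : pvRowsScan (r :: rs) = ((pvRowScan r).1 :: (pvRowsScan rs).1, (pvRowsScan rs).2) := by
        simp [pvRowsScan, hs']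
      rw [h1]
      simp [pvRowScan_compact r 0 0, ih]

-- a row with no "O" (resp. no ".") is its own compaction
theorem pvCompact_noO (r : List String) (h : ¬ ("O" ∈ r)) :
    ∀ (d : Nat), pvCompact r 0 d = List.replicate d "." ++ r := by
  induction r with
  | nil => intro d; simp [pvCompact]
  | cons c t ih =>
    intro d
    have hO : ¬ c = "O" := fun hc => h (hc ▸ List.mem_cons_self)
    have ht : ¬ ("O" ∈ t) := fun hm => h (List.mem_cons_of_mem c hm)
    by_cases hdot : c = "."
    · subst hdot
      have hstep : pvCompact ("." :: t) 0 d = pvCompact t 0 (d + 1) := by simp [pvCompact]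
      rw [hstep, ih ht (d + 1)]
      simp [List.replicate_succ']
    · have hstep : pvCompact (c :: t) 0 d
          = List.replicate 0 "O" ++ List.replicate d "." ++ c :: pvCompact t 0 0 := by
        simp [pvCompact, hO, hdot]
      rw [hstep, ih ht 0]
      simp

theorem pvCompact_noDot (r : List String) (h : ¬ ("." ∈ r)) :
    ∀ (o : Nat), pvCompact r o 0 = List.replicate o "O" ++ r := by
  induction r with
  | nil => intro o; simp [pvCompact]
  | cons c t ih =>
    intro o
    have hdot : ¬ c = "." := fun hc => h (hc ▸ List.mem_cons_self)
    have ht : ¬ ("." ∈ t) := fun hm => h (List.mem_cons_of_mem c hm)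
    by_cases hO : c = "O"
    · subst hO
      have hstep : pvCompact ("O" :: t) o 0 = pvCompact t (o + 1) 0 := by simp [pvCompact]
      rw [hstep, ih ht (o + 1)]
      simp [List.replicate_succ']
    · have hstep : pvCompact (c :: t) o 0
          = List.replicate o "O" ++ List.replicate 0 "." ++ c :: pvCompact t 0 0 := by
        simp [pvCompact, hO, hdot]
      rw [hstep, ih ht 0]
      simp

-- the settled-row fast path of B returns exactly the compaction
theorem pvAltRow_eq (r : List String) :
    (if ¬ ("O" ∈ r) ∨ ¬ ("." ∈ r) then r else pvCompact r 0 0) = pvCompact r 0 0 := by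
  split
  · rename_i hcase
    rcases hcase with h | h
    · simpa using (pvCompact_noO r h 0).symm
    · simpa using (pvCompact_noDot r h 0).symm
  · rfl

theorem pvLoop_eq (p : List (List String)) :
    pvLoop p = p.map (fun r => pvCompact r 0 0) := by
  rw [pvLoop]
  by_cases h : (pvRowsScan p).2 = true
  · rw [dif_pos h]
    rw [pvLoop_eq (pvRowsScan p).1]
    exact pvRowsScan_compact p
  · rw [dif_neg h]
    have h' : (pvRowsScan p).2 = false := by simpa using h
    obtain ⟨h1, h2⟩ := pvRowsScan_false p h'
    rw [h1]
    exact h2.symm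
termination_by pvPlatMu p
decreasing_by exact pvRowsScan_mu p h

-- ===== VERDICT (by name: the statement is the Claim_ definition above) =====
theorem shift_west_spec : Claim_equal_shift_west := by
  intro platform _
  show shift_west platform = shift_west_alt platform
  unfold shift_west shift_west_alt
  rw [pvLoop_eq platform]
  exact (List.map_congr_left (fun r _ => pvAltRow_eq r)).symm
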